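-- pv_equiv track=rewrite | github.com/AthharPro/zypher | python-scanner/zypher_scanner/db_ruls/cicd-vuln-007.py | _find_step_line_number
-- ===== SOURCE A (Python) =====
-- from typing import List, Dict, Any
--
-- def _find_step_line_number(file_lines: List[str], job_name: str, step_index: int) -> int:
--     job_line = -1
--     steps_line = -1
--     step_count = -1
--     for i, line in enumerate(file_lines):
--         if line.strip().startswith(f"{job_name}:"):
--             job_line = i
--             break
--     if job_line < 0:
--         return -1
--     for i in range(job_line, len(file_lines)):
--         if "steps:" in file_lines[i]:
--             steps_line = i
--             break
--     if steps_line < 0: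
--         return -1
--     for i in range(steps_line + 1, len(file_lines)):
--         if file_lines[i].strip().startswith("- "):
--             step_count += 1
--             if step_count == step_index:
--                 return i
--     return -1
-- ===== SOURCE B (Python) =====
-- def _find_step_line_number(file_lines, job_name, step_index):
--     # single pass state machine: 0 = seeking job, 1 = seeking "steps:", 2 = counting steps
--     phase = 0
--     count = -1
--     for i, line in enumerate(file_lines):
--         if phase == 0 and line.strip().startswith(job_name + ":"):
--             phase = 1
--         if phase == 1 and "steps:" in line:
--             phase = 2
--             continue
--         if phase == 2 and line.strip().startswith("- "):
--             count += 1
--             if count == step_index: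
--                 return i
--     return -1
-- ===== Notes on version B (the rewrite author's own statement) =====
-- stated objective: simpler
-- what changed: A's three sequential scans (find job line, re-scan from there for 'steps:', then a third indexed scan counting '- ' items) are replaced by one pass over enumerate(file_lines) with a phase variable (seek-job -> seek-steps -> counting) and a step counter.
import Mathlib
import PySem

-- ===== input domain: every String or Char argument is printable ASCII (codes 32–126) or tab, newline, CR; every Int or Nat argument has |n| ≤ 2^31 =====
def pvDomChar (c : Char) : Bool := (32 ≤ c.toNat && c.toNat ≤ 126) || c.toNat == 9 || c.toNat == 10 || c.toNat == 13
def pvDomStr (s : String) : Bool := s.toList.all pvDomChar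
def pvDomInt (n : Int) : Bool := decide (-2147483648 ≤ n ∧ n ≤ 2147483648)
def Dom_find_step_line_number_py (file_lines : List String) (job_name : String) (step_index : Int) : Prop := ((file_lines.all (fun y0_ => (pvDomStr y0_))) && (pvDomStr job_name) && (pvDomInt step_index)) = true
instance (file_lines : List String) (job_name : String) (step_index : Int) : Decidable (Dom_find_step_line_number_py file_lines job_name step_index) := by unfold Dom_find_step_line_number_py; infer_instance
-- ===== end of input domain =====

-- B replaces A's three sequential scans (job line, then 'steps:' line, then counting) by one
-- pass over enumerate(file_lines) with a phase variable; objective: simpler (single pass).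

-- ===== PORT A =====
-- loop 1: 'for i, line in enumerate(file_lines): if line.strip().startswith(job_name + ":"): break'
def pvA_loop1 (job_name : String) : List String → Nat → Option Nat
  | [], _ => none
  | l :: rest, i =>
      if PySem.Str.startswith (PySem.Str.strip l) (job_name ++ ":") then some i
      else pvA_loop1 job_name rest (i + 1)

-- loop 2: 'for i in range(job_line, len(file_lines)): if "steps:" in file_lines[i]: break'
-- (transliterated as recursion over the suffix file_lines.drop job_line, carrying the index i:
--  visits exactly file_lines[i] for i = job_line, …, len-1 in order)
def pvA_loop2 : List String → Nat → Option Nat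
  | [], _ => none
  | l :: rest, i =>
      if PySem.Str.isIn "steps:" l then some i
      else pvA_loop2 rest (i + 1)

-- loop 3: 'for i in range(steps_line+1, len(file_lines)): …' with step_count accumulator
-- (same suffix-with-index transliteration)
def pvA_loop3 (step_index : Int) : List String → Nat → Int → Int
  | [], _, _ => -1
  | l :: rest, i, step_count =>
      if PySem.Str.startswith (PySem.Str.strip l) "- " then
        if step_count + 1 == step_index then (i : Int)
        else pvA_loop3 step_index rest (i + 1) (step_count + 1)
      else pvA_loop3 step_index rest (i + 1) step_count

def find_step_line_number_py (file_lines : List String) (job_name : String) (step_index : Int) : Int :=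
  match pvA_loop1 job_name file_lines 0 with
  | none => -1
  | some job_line =>
    match pvA_loop2 (file_lines.drop job_line) job_line with
    | none => -1
    | some steps_line => pvA_loop3 step_index (file_lines.drop (steps_line + 1)) (steps_line + 1) (-1)

-- ===== PORT B =====
-- the single loop of Source B: phase 0 → 1 on the job line (falling through), 1 → 2 on a 'steps:'
-- line (continue), counting '- ' lines in phase 2
def pvB_loop (job_name : String) (step_index : Int) : List String → Nat → Nat → Int → Int
  | [], _, _, _ => -1
  | l :: rest, i, phase, count =>
      let phase := if phase == 0 && PySem.Str.startswith (PySem.Str.strip l) (job_name ++ ":") then 1 else phase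
      if phase == 1 && PySem.Str.isIn "steps:" l then
        pvB_loop job_name step_index rest (i + 1) 2 count
      else if phase == 2 && PySem.Str.startswith (PySem.Str.strip l) "- " then
        if count + 1 == step_index then (i : Int)
        else pvB_loop job_name step_index rest (i + 1) phase (count + 1)
      else pvB_loop job_name step_index rest (i + 1) phase count

def find_step_line_number_py_alt (file_lines : List String) (job_name : String) (step_index : Int) : Int :=
  pvB_loop job_name step_index file_lines 0 0 (-1)

-- ===== PRECONDITION & SPEC =====
def Spec_find_step_line_number_py (file_lines : List String) (job_name : String) (step_index : Int) (out : Int) : Prop := out = find_step_line_number_py_alt file_lines job_name step_index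
instance (file_lines : List String) (job_name : String) (step_index : Int) (out : Int) : Decidable (Spec_find_step_line_number_py file_lines job_name step_index out) := by unfold Spec_find_step_line_number_py; infer_instance

-- ===== CLAIM (what is proved, stated in full; the proofs are below) =====
def Claim_equal_find_step_line_number_py : Prop := ∀ (file_lines : List String) (job_name : String) (step_index : Int), Dom_find_step_line_number_py file_lines job_name step_index → Spec_find_step_line_number_py file_lines job_name step_index (find_step_line_number_py file_lines job_name step_index)

-- ===== LEMMAS AND PROOFS =====

theorem pvA_loop1_ge (job_name : String) (xs : List String) (i j : Nat)
    (h : pvA_loop1 job_name xs i = some j) : i ≤ j := by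
  induction xs generalizing i with
  | nil => simp [pvA_loop1] at h
  | cons l rest ih =>
    unfold pvA_loop1 at h
    split at h
    · simp at h; omega
    · have := ih _ h; omega

theorem pvA_loop2_ge (xs : List String) (i j : Nat)
    (h : pvA_loop2 xs i = some j) : i ≤ j := by
  induction xs generalizing i with
  | nil => simp [pvA_loop2] at h
  | cons l rest ih =>
    unfold pvA_loop2 at h
    split at h
    · simp at h; omega
    · have := ih _ h; omega

-- phase 2 of B is exactly A's loop 3
theorem pvB_phase2 (job_name : String) (step_index : Int) (xs : List String) (i : Nat) (c : Int) :
    pvB_loop job_name step_index xs i 2 c = pvA_loop3 step_index xs i c := by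
  induction xs generalizing i c with
  | nil => rfl
  | cons l rest ih =>
    simp only [pvB_loop, pvA_loop3]
    simp [ih]

-- phase 1 of B runs A's loop 2 and then loop 3 on the rest
theorem pvB_phase1 (job_name : String) (step_index : Int) (xs : List String) (i : Nat) (c : Int) :
    pvB_loop job_name step_index xs i 1 c =
      match pvA_loop2 xs i with
      | none => -1
      | some k => pvA_loop3 step_index (xs.drop (k + 1 - i)) (k + 1) c := by
  induction xs generalizing i c with
  | nil => rfl
  | cons l rest ih =>
    by_cases hS : PySem.Str.isIn "steps:" l = true
    · simp only [pvB_loop, pvA_loop2]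
      simp at hS
      simp [hS, pvB_phase2]
    · simp only [pvB_loop, pvA_loop2]
      simp at hS
      simp [hS, ih]
      cases h2 : pvA_loop2 rest (i + 1) with
      | none => rfl
      | some k =>
        have hk := pvA_loop2_ge _ _ _ h2
        simp only
        have he : k + 1 - i = (k - i) + 1 := by omega
        rw [he, List.drop_succ_cons]

-- phase 0 of B runs A's loop 1 and then continues in phase 1 from the matching line
theorem pvB_phase0 (job_name : String) (step_index : Int) (xs : List String) (i : Nat) (c : Int) :
    pvB_loop job_name step_index xs i 0 c =
      match pvA_loop1 job_name xs i with
      | none => -1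
      | some j => pvB_loop job_name step_index (xs.drop (j - i)) j 1 c := by
  induction xs generalizing i c with
  | nil => rfl
  | cons l rest ih =>
    by_cases hJ : PySem.Str.startswith (PySem.Str.strip l) (job_name ++ ":") = true
    · -- the matching line itself is re-examined in phase 1 (drop 0)
      unfold pvA_loop1
      rw [if_pos hJ]
      simp only [Nat.sub_self, List.drop_zero]
      conv_lhs => unfold pvB_loop
      conv_rhs => unfold pvB_loop
      simp at hJ
      simp [hJ]
    · unfold pvA_loop1
      rw [if_neg hJ]
      simp only [pvB_loop]
      simp at hJ
      simp [hJ, ih]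
      cases h1 : pvA_loop1 job_name rest (i + 1) with
      | none => rfl
      | some j =>
        have hj := pvA_loop1_ge _ _ _ _ h1
        simp only
        have he : j - i = (j - (i + 1)) + 1 := by omega
        rw [he]
        rfl

-- ===== VERDICT (by name: the statement is the Claim_ definition above) =====
theorem find_step_line_number_py_spec : Claim_equal_find_step_line_number_py := by
  intro file_lines job_name step_index _
  unfold Spec_find_step_line_number_py find_step_line_number_py find_step_line_number_py_alt
  rw [pvB_phase0]
  cases h1 : pvA_loop1 job_name file_lines 0 with
  | none => rfl
  | some j =>
    simp only
    rw [pvB_phase1]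
    cases h2 : pvA_loop2 (file_lines.drop (j - 0)) j with
    | none => rfl
    | some k =>
      have hk := pvA_loop2_ge _ _ _ h2
      have he : j + (k + 1 - j) = k + 1 := by omega
      simp only [Nat.sub_zero, List.drop_drop, he]
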